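-- pv_equiv track=rewrite | github.com/shikhar-srivastava/TANS | training/dispatch_one.py | alloc_parition
-- ===== SOURCE A (Python) =====
-- def alloc_parition(job_count):
--     setup = {'default-short':4, 'multigpu':2, 'default-long':1,}
--     n_jobs_avail =  0
--     for key, value in setup.items():
--         n_jobs_avail += value
--     _index = job_count%n_jobs_avail
--     for key, value in setup.items():
--         if _index < value:
--             return key
--         else:
--             _index -= value
-- ===== SOURCE B (Python) =====
-- _TABLE = (['default-short'] * 4) + (['multigpu'] * 2) + (['default-long'] * 1)
--
-- def alloc_parition(job_count):
--     return _TABLE[job_count % len(_TABLE)]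
-- ===== Notes on version B (the rewrite author's own statement) =====
-- stated objective: simpler
-- what changed: Replaces the summing pass and the cumulative decrement-and-compare scan over the dict with a precomputed flat table (each partition name repeated by its capacity) indexed directly by job_count % 7.
import Mathlib
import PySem

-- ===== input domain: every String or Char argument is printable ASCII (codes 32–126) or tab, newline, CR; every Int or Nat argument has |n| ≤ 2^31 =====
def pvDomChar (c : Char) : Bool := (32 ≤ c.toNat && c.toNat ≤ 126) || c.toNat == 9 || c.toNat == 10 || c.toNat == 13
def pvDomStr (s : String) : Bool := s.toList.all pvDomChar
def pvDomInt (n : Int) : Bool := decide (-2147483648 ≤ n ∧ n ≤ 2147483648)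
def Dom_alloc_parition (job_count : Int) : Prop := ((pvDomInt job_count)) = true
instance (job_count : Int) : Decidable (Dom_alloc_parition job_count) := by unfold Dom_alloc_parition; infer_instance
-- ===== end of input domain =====

-- ===== PORT A =====
-- setup dict as an association list (insertion order)
def allocSetup : List (String × Int) :=
  [("default-short", 4), ("multigpu", 2), ("default-long", 1)]

-- second loop of A: walk the items, return key when _index < value, else subtract
def allocScan (index : Int) : List (String × Int) → Option String
  | [] => none
  | (key, value) :: rest =>
      if index < value then some key else allocScan (index - value) rest

def alloc_parition (job_count : Int) : String :=
  let n_jobs_avail := allocSetup.foldl (fun acc kv => acc + kv.2) 0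
  let _index := PySem.Int.mod job_count n_jobs_avail
  -- the loop always returns on this setup; Python's implicit None fall-through is unreachable
  (allocScan _index allocSetup).getD ""

-- ===== PORT B =====
-- flat lookup table: each partition name repeated by its capacity
def allocTable : List String :=
  (List.replicate 4 "default-short") ++ (List.replicate 2 "multigpu") ++ (List.replicate 1 "default-long")

def alloc_parition_alt (job_count : Int) : String :=
  (PySem.List.pyGet? allocTable (PySem.Int.mod job_count (allocTable.length : Int))).getD ""

-- ===== PRECONDITION & SPEC =====
def Spec_alloc_parition (job_count : Int) (out : String) : Prop := out = alloc_parition_alt job_count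
instance (job_count : Int) (out : String) : Decidable (Spec_alloc_parition job_count out) := by unfold Spec_alloc_parition; infer_instance

-- ===== CLAIM (what is proved, stated in full; the proofs are below) =====
def Claim_equal_alloc_parition : Prop := ∀ (job_count : Int), Dom_alloc_parition job_count → Spec_alloc_parition job_count (alloc_parition job_count)

-- ===== LEMMAS AND PROOFS =====

-- ===== VERDICT (by name: the statement is the Claim_ definition above) =====
theorem allocScan_eq_table (r : Int) (h0 : 0 ≤ r) (h7 : r < 7) :
    (allocScan r allocSetup).getD "" = (PySem.List.pyGet? allocTable r).getD "" := by
  interval_cases r <;> decide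

theorem alloc_parition_spec : Claim_equal_alloc_parition := by
  intro job_count _
  unfold Spec_alloc_parition alloc_parition alloc_parition_alt
  have hsum : allocSetup.foldl (fun acc kv => acc + kv.2) 0 = 7 := by decide
  have hlen : ((allocTable.length : Nat) : Int) = 7 := by decide
  rw [hsum, hlen]
  have hemod := PySem.Int.mod_eq_emod_of_pos (a := job_count) (b := 7) (by norm_num)
  exact allocScan_eq_table _
    (by rw [hemod]; exact Int.emod_nonneg _ (by norm_num))
    (by rw [hemod]; exact Int.emod_lt_of_pos _ (by norm_num))
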